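-- pv_equiv track=rewrite | github.com/egilron/elsa-introduction | helpers.py | spans_to_list
-- ===== SOURCE A (Python) =====
-- def spans_to_list(startlist, tagspans):
--   """Takes an empty ("O") list and a list of tagspans
--       tags the empty list accordingly """
--   for idx in range(len(startlist)):
--     for label, span in tagspans:
--       if idx in span:
--         prefix = "I-"
--         if idx == min(span):
--           prefix = "B-"
--         startlist[idx] = prefix+label
--         break
--   return startlist
-- ===== SOURCE B (Python) =====
-- def spans_to_list(startlist, tagspans):
--   """Takes an empty ("O") list and a list of tagspans
--       tags the empty list accordingly """
--   # Build a first-wins position->tag index in one pass over the spans,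
--   # then emit the result in one pass over startlist.
--   tag = {}
--   for label, span in tagspans:
--     if not span:
--       continue
--     m = min(span)
--     for p in span:
--       if p not in tag:
--         tag[p] = ("B-" if p == m else "I-") + label
--   return [tag.get(i, x) for i, x in enumerate(startlist)]
-- ===== Notes on version B (the rewrite author's own statement) =====
-- stated objective: faster
-- what changed: Instead of scanning all tagspans (with a min() recomputation) for every index of startlist, B makes one pass over the tagspans building a first-wins dict from position to tag, then produces the output in a single pass over startlist; A mutates startlist in place while B returns a fresh list (return value is identical).
import Mathlib
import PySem

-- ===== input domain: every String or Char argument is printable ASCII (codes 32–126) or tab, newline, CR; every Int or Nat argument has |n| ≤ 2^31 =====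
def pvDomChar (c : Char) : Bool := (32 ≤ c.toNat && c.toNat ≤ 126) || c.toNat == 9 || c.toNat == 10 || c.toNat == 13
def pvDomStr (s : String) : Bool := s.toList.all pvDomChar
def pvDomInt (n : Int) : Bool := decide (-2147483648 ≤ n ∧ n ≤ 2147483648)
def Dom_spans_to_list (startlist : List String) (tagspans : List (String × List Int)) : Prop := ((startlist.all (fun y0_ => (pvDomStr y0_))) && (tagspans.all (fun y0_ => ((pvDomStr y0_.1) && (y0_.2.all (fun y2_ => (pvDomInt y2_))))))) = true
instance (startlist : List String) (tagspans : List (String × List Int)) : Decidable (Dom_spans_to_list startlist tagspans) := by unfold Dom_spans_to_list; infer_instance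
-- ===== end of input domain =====

-- B builds a first-wins position→tag dict in one pass over the spans, then emits the
-- output in one pass; A mutates startlist in place, B returns a fresh list (equal value).

-- min(span), guarded by nonemptiness at every call site (shared by both ports)
def pyMin (s : List Int) : Int := (PySem.List.min? s (fun x => x)).getD 0

-- ===== PORT A =====
-- inner 'for label, span in tagspans: … break' loop of A
def aInner (idx : Nat) (tagspans : List (String × List Int)) (cur : List String) : List String :=
  match tagspans with
  | [] => cur
  | (label, span) :: rest =>
    if (idx : Int) ∈ span then
      let pfx := if (idx : Int) = pyMin span then "B-" else "I-"
      cur.set idx (pfx ++ label)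
    else aInner idx rest cur

def spans_to_list (startlist : List String) (tagspans : List (String × List Int)) : List String :=
  (List.range startlist.length).foldl (fun cur idx => aInner idx tagspans cur) startlist

-- ===== PORT B =====
-- inner 'for p in span: if p not in tag: tag[p] = …' loop of B
def bInner (label : String) (m : Int) (span : List Int) (d : PySem.Dict Int String) : PySem.Dict Int String :=
  span.foldl (fun d p =>
    if d.contains p then d
    else d.insert p ((if p = m then "B-" else "I-") ++ label)) d

def bStep (d : PySem.Dict Int String) (ls : String × List Int) : PySem.Dict Int String :=
  match ls.2 with
  | [] => d
  | _ :: _ => bInner ls.1 (pyMin ls.2) ls.2 d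

def spans_to_list_alt (startlist : List String) (tagspans : List (String × List Int)) : List String :=
  let tag := tagspans.foldl bStep PySem.Dict.empty
  (PySem.List.enumerate startlist).map (fun p => tag.getD p.1 p.2)

-- ===== PRECONDITION & SPEC =====
def Spec_spans_to_list (startlist : List String) (tagspans : List (String × List Int)) (out : List String) : Prop := out = spans_to_list_alt startlist tagspans
instance (startlist : List String) (tagspans : List (String × List Int)) (out : List String) : Decidable (Spec_spans_to_list startlist tagspans out) := by unfold Spec_spans_to_list; infer_instance

-- ===== CLAIM (what is proved, stated in full; the proofs are below) =====
def Claim_equal_spans_to_list : Prop := ∀ (startlist : List String) (tagspans : List (String × List Int)), Dom_spans_to_list startlist tagspans → Spec_spans_to_list startlist tagspans (spans_to_list startlist tagspans)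

-- ===== LEMMAS AND PROOFS =====

-- the tag that the first span containing i assigns (common characterisation)
def findTag (i : Int) (ts : List (String × List Int)) : Option String :=
  (ts.find? (fun ls => decide (i ∈ ls.2))).map
    (fun ls => (if i = pyMin ls.2 then "B-" else "I-") ++ ls.1)

theorem bInner_cons (label : String) (m q : Int) (t : List Int) (d : PySem.Dict Int String) :
    bInner label m (q :: t) d =
      bInner label m t
        (if d.contains q then d
         else d.insert q ((if q = m then "B-" else "I-") ++ label)) := rfl

theorem aInner_eq (idx : Nat) (ts : List (String × List Int)) (cur : List String) :
    aInner idx ts cur = match findTag (idx : Int) ts with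
      | some t => cur.set idx t
      | none => cur := by
  induction ts with
  | nil => simp [aInner, findTag]
  | cons hd tl ih =>
    obtain ⟨label, span⟩ := hd
    by_cases h : (idx : Int) ∈ span
    · simp [aInner, findTag, h]
    · simp [aInner, findTag, h] at ih ⊢
      exact ih

theorem length_aInner (idx : Nat) (ts : List (String × List Int)) (cur : List String) :
    (aInner idx ts cur).length = cur.length := by
  rw [aInner_eq]
  cases findTag (idx : Int) ts <;> simp

theorem foldA_getElem? (idxs : List Nat) (ts : List (String × List Int))
    (acc : List String) (j : Nat) (hj : ∀ i ∈ idxs, i < acc.length) :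
    (idxs.foldl (fun cur idx => aInner idx ts cur) acc)[j]? =
      if j ∈ idxs then
        match findTag (j : Int) ts with
        | some t => some t
        | none => acc[j]?
      else acc[j]? := by
  induction idxs generalizing acc with
  | nil => simp
  | cons idx rest ih =>
    have hlen : (aInner idx ts acc).length = acc.length := length_aInner idx ts acc
    have hj' : ∀ i ∈ rest, i < (aInner idx ts acc).length := by
      intro i hi; rw [hlen]; exact hj i (List.mem_cons_of_mem _ hi)
    have key : ∀ t, findTag (j : Int) ts = some t → j = idx →
        (aInner idx ts acc)[j]? = some t := by
      intro t ht hji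
      subst hji
      rw [aInner_eq, ht]
      exact List.getElem?_set_self (hj j (List.mem_cons_self))
    have keep : (findTag (j : Int) ts = none ∨ j ≠ idx) →
        (aInner idx ts acc)[j]? = acc[j]? := by
      intro h
      rw [aInner_eq]
      rcases h with h | h
      · cases hcast : findTag (idx : Int) ts with
        | none => rfl
        | some t =>
          simp only []
          rw [List.getElem?_set_ne]
          intro he
          rw [he] at hcast
          rw [hcast] at h
          exact (Option.some_ne_none t h).elim
      · cases hcast : findTag (idx : Int) ts with
        | none => rfl
        | some t =>
          simp only []
          rw [List.getElem?_set_ne]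
          exact fun he => h he.symm
    simp only [List.foldl_cons]
    rw [ih _ hj']
    by_cases hmem : j ∈ rest
    · rw [if_pos hmem, if_pos (List.mem_cons_of_mem _ hmem)]
      cases hft : findTag (j : Int) ts with
      | some t => rfl
      | none => exact keep (Or.inl hft)
    · by_cases hji : j = idx
      · subst hji
        rw [if_neg hmem, if_pos List.mem_cons_self]
        cases hft : findTag (j : Int) ts with
        | some t => exact key t hft rfl
        | none => exact keep (Or.inl hft)
      · rw [if_neg hmem, if_neg (by simp [hji, hmem])]
        exact keep (Or.inr hji)

theorem bInner_some (label : String) (m : Int) (span : List Int)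
    (d : PySem.Dict Int String) (p : Int) (v : String) (h : d.get? p = some v) :
    (bInner label m span d).get? p = some v := by
  induction span generalizing d with
  | nil => exact h
  | cons q t ih =>
    rw [bInner_cons]
    by_cases hc : d.contains q = true
    · rw [if_pos hc]; exact ih d h
    · rw [if_neg hc]
      apply ih
      rw [PySem.Dict.get?_insert]
      split
      · rename_i he
        exfalso
        have hcq : d.contains p = (d.get? p).isSome := PySem.Dict.contains_eq_isSome_get? d p
        rw [h] at hcq
        rw [he] at hcq
        simp [hcq] at hc
      · exact h

theorem bInner_not_mem (label : String) (m : Int) (span : List Int)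
    (d : PySem.Dict Int String) (p : Int) (h : p ∉ span) :
    (bInner label m span d).get? p = d.get? p := by
  induction span generalizing d with
  | nil => rfl
  | cons q t ih =>
    have hpq : p ≠ q := fun he => h (he ▸ List.mem_cons_self)
    have hpt : p ∉ t := fun hm => h (List.mem_cons_of_mem _ hm)
    rw [bInner_cons]
    by_cases hc : d.contains q = true
    · rw [if_pos hc]; exact ih d hpt
    · rw [if_neg hc, ih _ hpt, PySem.Dict.get?_insert, if_neg hpq]

theorem bInner_none_mem (label : String) (m : Int) (span : List Int)
    (d : PySem.Dict Int String) (p : Int) (h : d.get? p = none) (hm : p ∈ span) :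
    (bInner label m span d).get? p = some ((if p = m then "B-" else "I-") ++ label) := by
  induction span generalizing d with
  | nil => exact absurd hm (List.not_mem_nil)
  | cons q t ih =>
    rw [bInner_cons]
    by_cases hc : d.contains q = true
    · rw [if_pos hc]
      have hpq : p ≠ q := by
        intro he
        have : d.contains p = (d.get? p).isSome := PySem.Dict.contains_eq_isSome_get? d p
        rw [h] at this
        rw [he, hc] at this
        exact Bool.noConfusion this
      have hpt : p ∈ t := by
        rcases List.mem_cons.mp hm with he | ht
        · exact absurd he hpq
        · exact ht
      exact ih d h hpt
    · rw [if_neg hc]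
      by_cases hpq : p = q
      · subst hpq
        exact bInner_some _ _ _ _ _ _ (PySem.Dict.get?_insert_self _ _ _)
      · have hpt : p ∈ t := by
          rcases List.mem_cons.mp hm with he | ht
          · exact absurd he hpq
          · exact ht
        apply ih _ _ hpt
        rw [PySem.Dict.get?_insert, if_neg hpq]
        exact h

theorem bStep_cons (d : PySem.Dict Int String) (label : String) (q : Int) (t : List Int) :
    bStep d (label, q :: t) = bInner label (pyMin (q :: t)) (q :: t) d := rfl

theorem foldB_get? (ts : List (String × List Int)) (d : PySem.Dict Int String) (p : Int) :
    (ts.foldl bStep d).get? p =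
      match d.get? p with
      | some v => some v
      | none => findTag p ts := by
  induction ts generalizing d with
  | nil => cases hd : d.get? p <;> simp [findTag, hd]
  | cons hd rest ih =>
    obtain ⟨label, span⟩ := hd
    simp only [List.foldl_cons]
    rw [ih]
    cases hdp : d.get? p with
    | some v =>
      have : (bStep d (label, span)).get? p = some v := by
        cases span with
        | nil => exact hdp
        | cons q t => exact bInner_some _ _ _ _ _ _ hdp
      rw [this]
    | none =>
      cases span with
      | nil =>
        simp only [bStep]
        rw [hdp]
        simp [findTag]
      | cons q t =>
        by_cases hm : p ∈ q :: t
        · have : (bStep d (label, q :: t)).get? p =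
              some ((if p = pyMin (q :: t) then "B-" else "I-") ++ label) :=
            bInner_none_mem _ _ _ _ _ hdp hm
          rw [this]
          simp [findTag, hm]
        · have : (bStep d (label, q :: t)).get? p = none := by
            rw [bStep_cons, bInner_not_mem _ _ _ _ _ hm]; exact hdp
          rw [this]
          simp [findTag, hm]

theorem length_spans_to_list (startlist : List String) (ts : List (String × List Int)) :
    (spans_to_list startlist ts).length = startlist.length := by
  unfold spans_to_list
  generalize hn : startlist.length = n
  have : ∀ (idxs : List Nat) (acc : List String),
      (idxs.foldl (fun cur idx => aInner idx ts cur) acc).length = acc.length := by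
    intro idxs
    induction idxs with
    | nil => intro acc; rfl
    | cons i r ih => intro acc; simp only [List.foldl_cons]; rw [ih, length_aInner]
  rw [this, hn]

theorem spans_to_list_spec : Claim_equal_spans_to_list := by
  unfold Claim_equal_spans_to_list
  intro startlist tagspans _
  unfold Spec_spans_to_list
  apply List.ext_getElem?
  intro j
  have hlenA := length_spans_to_list startlist tagspans
  have hB : (spans_to_list_alt startlist tagspans)[j]? =
      startlist[j]?.map (fun x =>
        ((tagspans.foldl bStep PySem.Dict.empty).getD (j : Int) x)) := by
    unfold spans_to_list_alt
    simp only [List.getElem?_map, PySem.List.getElem?_enumerate]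
    cases startlist[j]? <;> simp
  by_cases hj : j < startlist.length
  · obtain ⟨x, hx⟩ : ∃ x, startlist[j]? = some x := ⟨startlist[j], List.getElem?_eq_getElem hj⟩
    have hA : (spans_to_list startlist tagspans)[j]? =
        match findTag (j : Int) tagspans with
        | some t => some t
        | none => startlist[j]? := by
      unfold spans_to_list
      rw [foldA_getElem? _ _ _ _ (fun i hi => List.mem_range.mp hi)]
      simp [List.mem_range, hj]
    have hdict : (tagspans.foldl bStep PySem.Dict.empty).getD (j : Int) x =
        (findTag (j : Int) tagspans).getD x := by
      rw [PySem.Dict.getD_eq_get?_getD, foldB_get?]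
      simp [PySem.Dict.get?_empty]
    rw [hA, hB, hx]
    simp only [Option.map_some, hdict]
    cases findTag (j : Int) tagspans <;> simp
  · have h1 : (spans_to_list startlist tagspans)[j]? = none := by
      apply List.getElem?_eq_none
      omega
    have h2 : startlist[j]? = none := List.getElem?_eq_none (by omega)
    rw [h1, hB, h2]
    rfl
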